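-- pv_equiv track=rewrite | github.com/jjimeneztr/04-metallurgy-amine | excel.py | find_immediate_bounds
-- ===== SOURCE A (Python) =====
-- def find_immediate_bounds(value, preset_values):
--     """
--     Find the immediate lower and upper bounds for a value in a sorted list of preset values.
--
--     Parameters:
--         value: The value to find bounds for.
--         preset_values: A sorted list of preset values.
--
--     Returns:
--         A tuple (lower, upper) with the immediate lower and upper bounds.
--     """
--     lower = None
--     upper = None
--     for v in sorted(preset_values):
--         if v <= value:
--             lower = v
--         if v >= value:
--             upper = v
--             break
--     if lower == value:
--         upper = lower
--     return lower, upper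
-- ===== SOURCE B (Python) =====
-- def find_immediate_bounds(value, preset_values):
--     """Simpler decomposition: sort once, then compute each bound by an
--     independent filter-then-reduce pass (max of the <= side, min of the >= side)."""
--     s = sorted(preset_values)
--     lows = [v for v in s if v <= value]
--     highs = [v for v in s if v >= value]
--     lower = max(lows) if lows else None
--     upper = min(highs) if highs else None
--     return lower, upper
-- ===== Notes on version B (the rewrite author's own statement) =====
-- stated objective: simpler
-- what changed: Replaced A's single stateful early-break scan (with a trailing exact-match patch-up) by two independent filter-then-reduce passes: lower = max of the elements <= value, upper = min of the elements >= value.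
import Mathlib
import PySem

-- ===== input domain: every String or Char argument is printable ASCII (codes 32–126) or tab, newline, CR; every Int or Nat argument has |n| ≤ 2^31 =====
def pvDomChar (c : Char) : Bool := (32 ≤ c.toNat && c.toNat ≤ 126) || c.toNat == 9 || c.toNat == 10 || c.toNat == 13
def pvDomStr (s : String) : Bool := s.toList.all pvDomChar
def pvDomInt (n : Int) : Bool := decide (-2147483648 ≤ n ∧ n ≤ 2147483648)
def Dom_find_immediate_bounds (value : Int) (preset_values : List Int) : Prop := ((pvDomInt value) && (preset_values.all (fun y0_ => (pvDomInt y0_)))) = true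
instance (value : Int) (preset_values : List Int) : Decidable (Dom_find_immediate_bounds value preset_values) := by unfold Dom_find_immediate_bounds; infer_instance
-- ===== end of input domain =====

-- B replaces A's single early-break scan over the sorted list by two independent
-- filter-then-reduce passes (max of the <= side, min of the >= side); same O(n log n) cost, simpler.


-- ===== PORT A =====
-- loop 'for v in sorted(preset_values): …' with the early break; state = lower, upper is produced at the break
def fibLoopA (value : Int) : List Int → Option Int → Option Int × Option Int
  | [], lower => (lower, none)
  | v :: rest, lower =>
    let lower' := if v ≤ value then some v else lower
    if value ≤ v then (lower', some v) else fibLoopA value rest lower'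

def find_immediate_bounds (value : Int) (preset_values : List Int) : Option Int × Option Int :=
  let r := fibLoopA value (PySem.List.sorted preset_values (fun x => x) false) none
  -- 'if lower == value: upper = lower'
  if r.1 = some value then (r.1, r.1) else r

-- ===== PORT B =====
def find_immediate_bounds_alt (value : Int) (preset_values : List Int) : Option Int × Option Int :=
  let s := PySem.List.sorted preset_values (fun x => x) false
  let lows := s.filter (fun v => decide (v ≤ value))
  let highs := s.filter (fun v => decide (value ≤ v))
  (if lows = [] then none else PySem.List.max? lows (fun x => x),
   if highs = [] then none else PySem.List.min? highs (fun x => x))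

-- ===== PRECONDITION & SPEC =====
def Spec_find_immediate_bounds (value : Int) (preset_values : List Int) (out : Option Int × Option Int) : Prop := out = find_immediate_bounds_alt value preset_values
instance (value : Int) (preset_values : List Int) (out : Option Int × Option Int) : Decidable (Spec_find_immediate_bounds value preset_values out) := by unfold Spec_find_immediate_bounds; infer_instance

-- ===== CLAIM (what is proved, stated in full; the proofs are below) =====
def Claim_equal_find_immediate_bounds : Prop := ∀ (value : Int) (preset_values : List Int), Dom_find_immediate_bounds value preset_values → Spec_find_immediate_bounds value preset_values (find_immediate_bounds value preset_values)

-- ===== LEMMAS AND PROOFS =====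

theorem foldl_max_of_le {t : List Int} {c : Int} (h : ∀ x ∈ t, x ≤ c) : t.foldl max c = c := by
  induction t generalizing c with
  | nil => rfl
  | cons y ys ih =>
    simp only [List.foldl_cons]
    have hy : y ≤ c := h y (by simp)
    rw [max_eq_left hy]
    exact ih (fun x hx => h x (by simp [hx]))

theorem foldl_min_of_ge {t : List Int} {c : Int} (h : ∀ x ∈ t, c ≤ x) : t.foldl min c = c := by
  induction t generalizing c with
  | nil => rfl
  | cons y ys ih =>
    simp only [List.foldl_cons]
    have hy : c ≤ y := h y (by simp)
    rw [min_eq_left hy]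
    exact ih (fun x hx => h x (by simp [hx]))

-- characterisation of A's loop on a sorted list
theorem fibLoopA_char (value : Int) : ∀ (s : List Int), s.Pairwise (· ≤ ·) → ∀ l0 : Option Int,
    fibLoopA value s l0 =
      ((if s.filter (fun v => decide (v ≤ value)) = [] then l0
        else PySem.List.max? (s.filter (fun v => decide (v ≤ value))) (fun x => x)),
       s.find? (fun v => decide (value ≤ v))) := by
  intro s
  induction s with
  | nil => intro _ l0; simp [fibLoopA]
  | cons v rest ih =>
    intro hp l0
    have hrest : ∀ x ∈ rest, v ≤ x := fun x hx => (List.pairwise_cons.mp hp).1 x hx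
    have hp' : rest.Pairwise (· ≤ ·) := (List.pairwise_cons.mp hp).2
    by_cases hge : value ≤ v
    · by_cases hle : v ≤ value
      · -- v = value; break with lower = upper = v
        have hv : v = value := le_antisymm hle hge
        simp only [fibLoopA, hle, hge, if_true]
        have hfilter : (v :: rest).filter (fun v => decide (v ≤ value)) =
            v :: rest.filter (fun v => decide (v ≤ value)) := by simp [hle]
        rw [hfilter]
        simp only [List.find?_cons, hge, decide_true]
        have hall : ∀ x ∈ rest.filter (fun v => decide (v ≤ value)), x ≤ v := by
          intro x hx
          have := List.of_mem_filter hx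
      -- elements of the filtered tail are ≤ value = v
          simpa [hv] using of_decide_eq_true this
        rw [PySem.List.max?_id_cons, foldl_max_of_le hall]
        simp
      · -- v > value: break immediately, no element ≤ value remains
        have hfilter : (v :: rest).filter (fun v => decide (v ≤ value)) = [] := by
          rw [List.filter_eq_nil_iff]
          intro x hx
          rcases List.mem_cons.mp hx with rfl | hx'
          · simpa using hle
          · have := hrest x hx'
            simp only [decide_eq_true_eq]
            omega
        simp [fibLoopA, hle, hge, hfilter]
    · -- v < value: update lower and continue
      have hle : v ≤ value := le_of_not_ge hge
      simp only [fibLoopA, hle, hge, if_true, if_false]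
      rw [ih hp' (some v)]
      have hfilter : (v :: rest).filter (fun v => decide (v ≤ value)) =
          v :: rest.filter (fun v => decide (v ≤ value)) := by simp [hle]
      rw [hfilter]
      simp only [List.find?_cons, show (decide (value ≤ v)) = false by simpa using hge]
      rcases hf : rest.filter (fun v => decide (v ≤ value)) with _ | ⟨w, t⟩
      · simp [PySem.List.max?]
      · have hwmem : w ∈ rest.filter (fun v => decide (v ≤ value)) := by rw [hf]; simp
        have hvw : v ≤ w := hrest w (List.mem_of_mem_filter hwmem)
        simp only [if_false, List.cons_ne_nil]
        rw [PySem.List.max?_id_cons, PySem.List.max?_id_cons]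
        simp [max_eq_right hvw]

-- on a sorted list, the first element ≥ value is the min of the ≥-filter
theorem find?_eq_min_filter (value : Int) (s : List Int) (hp : s.Pairwise (· ≤ ·)) :
    s.find? (fun v => decide (value ≤ v)) =
      (if s.filter (fun v => decide (value ≤ v)) = [] then none
       else PySem.List.min? (s.filter (fun v => decide (value ≤ v))) (fun x => x)) := by
  induction s with
  | nil => simp
  | cons v rest ih =>
    have hrest : ∀ x ∈ rest, v ≤ x := fun x hx => (List.pairwise_cons.mp hp).1 x hx
    have hp' : rest.Pairwise (· ≤ ·) := (List.pairwise_cons.mp hp).2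
    by_cases hge : value ≤ v
    · have hfilter : (v :: rest).filter (fun v => decide (value ≤ v)) =
          v :: rest.filter (fun v => decide (value ≤ v)) := by simp [hge]
      rw [hfilter]
      simp only [List.find?_cons, hge, decide_true, List.cons_ne_nil, if_false]
      have hall : ∀ x ∈ rest.filter (fun w => decide (value ≤ w)), v ≤ x :=
        fun x hx => hrest x (List.mem_of_mem_filter hx)
      rw [PySem.List.min?_id_cons, foldl_min_of_ge hall]
    · have hfilter : (v :: rest).filter (fun v => decide (value ≤ v)) =
          rest.filter (fun v => decide (value ≤ v)) := by simp [hge]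
      rw [hfilter]
      simp only [List.find?_cons, show (decide (value ≤ v)) = false by simpa using hge]
      exact ih hp'

-- ===== VERDICT (by name: the statement is the Claim_ definition above) =====
theorem find_immediate_bounds_spec : Claim_equal_find_immediate_bounds := by
  intro value preset_values _
  unfold Spec_find_immediate_bounds find_immediate_bounds find_immediate_bounds_alt
  have hp : (PySem.List.sorted preset_values (fun x => x) false).Pairwise (· ≤ ·) :=
    PySem.List.sorted_pairwise preset_values (fun x => x)
  set s := PySem.List.sorted preset_values (fun x => x) false with hs
  rw [fibLoopA_char value s hp none, find?_eq_min_filter value s hp]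
  set lows := s.filter (fun v => decide (v ≤ value)) with hlows
  set highs := s.filter (fun v => decide (value ≤ v)) with hhighs
  by_cases hlo : (if lows = [] then (none : Option Int) else PySem.List.max? lows (fun x => x)) = some value
  · rw [if_pos hlo]
    have hne : lows ≠ [] := by
      intro h; rw [h] at hlo; simp at hlo
    rw [if_neg hne] at hlo
    have hmemlows : value ∈ lows := by
      have := PySem.List.max?_mem hlo; exact this
    have hmems : value ∈ s := List.mem_of_mem_filter hmemlows
    have hvh : value ∈ highs := by
      rw [hhighs, List.mem_filter]; exact ⟨hmems, by simp⟩
    have hneh : highs ≠ [] := List.ne_nil_of_mem hvh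
    rcases hmin : PySem.List.min? highs (fun x => x) with _ | m
    · exact absurd ((PySem.List.min?_eq_none_iff highs (fun x => x)).mp hmin) hneh
    · have hm1 : m ∈ highs := PySem.List.min?_mem hmin
      have h1 : value ≤ m := by
        have := List.of_mem_filter hm1; simpa using this
      have h2 : m ≤ value := PySem.List.min?_isMin hmin value hvh
      have hmv : m = value := le_antisymm h2 h1
      show _ = ((if lows = [] then none else PySem.List.max? lows (fun x => x)),
                (if highs = [] then none else PySem.List.min? highs (fun x => x)))
      rw [if_neg hne, if_neg hneh, hlo, hmin, hmv]
      simp [if_neg hneh]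
  · rw [if_neg hlo]
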